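-- pv_equiv track=rewrite | github.com/AsjadA/QuestionMarkCheck | QuestionMarkCheck.py | QuestionMarks
-- ===== SOURCE A (Python) =====
-- def QuestionMarks(s):
--      qnum=0
--      has10=False
--      dig=0
--      for ch in s:
--          if ch.isdigit():
--              if int(ch)+dig==10:
--                 if qnum!=3:
--                     return "false"
--                 has10=True
--              dig=int(ch)
--              qnum=0
--          elif ch=="?":
--              qnum+=1
--      return "true" if has10 else "false"
-- ===== SOURCE B (Python) =====
-- def QuestionMarks(s):
--     # Phase 1: tokenize -- digit values and the count of '?' since the previous digit.
--     vals = []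
--     gaps = []
--     q = 0
--     for ch in s:
--         if ch.isdigit():
--             vals.append(int(ch))
--             gaps.append(q)
--             q = 0
--         elif ch == '?':
--             q += 1
--     # Phase 2: pairwise pass over consecutive digits.
--     found = False
--     for u, v, g in zip(vals, vals[1:], gaps[1:]):
--         if u + v == 10:
--             if g != 3:
--                 return "false"
--             found = True
--     return "true" if found else "false"
-- ===== Notes on version B (the rewrite author's own statement) =====
-- stated objective: alternative
-- what changed: A's single interleaved scan with (qnum, has10, dig) accumulators is replaced by a two-phase decomposition: first tokenize the string into a table of digit values and '?'-gap counts, then a separate pairwise pass over consecutive digits checks the sum-10/three-'?' condition.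
import Mathlib
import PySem

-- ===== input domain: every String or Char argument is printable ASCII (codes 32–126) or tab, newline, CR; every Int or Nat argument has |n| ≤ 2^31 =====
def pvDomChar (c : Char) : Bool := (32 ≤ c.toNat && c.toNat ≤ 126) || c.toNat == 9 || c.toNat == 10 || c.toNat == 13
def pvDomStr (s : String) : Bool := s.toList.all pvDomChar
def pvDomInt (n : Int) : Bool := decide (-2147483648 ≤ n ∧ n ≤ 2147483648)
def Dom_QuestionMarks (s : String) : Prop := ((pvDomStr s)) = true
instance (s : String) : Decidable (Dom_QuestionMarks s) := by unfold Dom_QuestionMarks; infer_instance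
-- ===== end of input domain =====

-- B replaces A's interleaved scan by a tokenize-then-pairwise-pass decomposition (alternative, same cost).


-- ===== PORT A =====
-- int(ch) for a single digit char: exact on ASCII digits (PySem.Chars.isdigit guards it)
def pvDigVal (c : Char) : Int := (c.toNat : Int) - 48

-- A's for-loop with early return, as structural recursion over the characters;
-- state (qnum, has10, dig) exactly as in the Python.
def pvLoopA : List Char → Int → Bool → Int → String
  | [], _, has10, _ => if has10 then "true" else "false"
  | c :: cs, qnum, has10, dig =>
      if PySem.Chars.isdigit c then
        if pvDigVal c + dig = 10 then
          if qnum ≠ 3 then "false"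
          else pvLoopA cs 0 true (pvDigVal c)
        else pvLoopA cs 0 has10 (pvDigVal c)
      else if c = '?' then pvLoopA cs (qnum + 1) has10 dig
      else pvLoopA cs qnum has10 dig

def QuestionMarks (s : String) : String := pvLoopA s.toList 0 false 0

-- ===== PORT B =====
-- Phase 1 of Source B: build vals (digit values) and gaps ('?'-count since previous digit)
-- by appending, exactly as the Python loop does.
def pvTokB : List Char → List Int → List Int → Int → List Int × List Int
  | [], vals, gaps, _ => (vals, gaps)
  | c :: cs, vals, gaps, q =>
      if PySem.Chars.isdigit c then pvTokB cs (vals ++ [pvDigVal c]) (gaps ++ [q]) 0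
      else if c = '?' then pvTokB cs vals gaps (q + 1)
      else pvTokB cs vals gaps q

-- Phase 2 of Source B: for u, v, g in zip(vals, vals[1:], gaps[1:]) with early return.
def pvChkB : List Int → List Int → Bool → String
  | u :: v :: vs, g :: gs, found =>
      if u + v = 10 then
        if g ≠ 3 then "false" else pvChkB (v :: vs) gs true
      else pvChkB (v :: vs) gs found
  | _, _, found => if found then "true" else "false"

def QuestionMarks_alt (s : String) : String :=
  let t := pvTokB s.toList [] [] 0
  pvChkB t.1 t.2.tail false

-- ===== PRECONDITION & SPEC =====
def Spec_QuestionMarks (s : String) (out : String) : Prop := out = QuestionMarks_alt s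
instance (s : String) (out : String) : Decidable (Spec_QuestionMarks s out) := by unfold Spec_QuestionMarks; infer_instance

-- ===== CLAIM (what is proved, stated in full; the proofs are below) =====
def Claim_equal_QuestionMarks : Prop := ∀ (s : String), Dom_QuestionMarks s → Spec_QuestionMarks s (QuestionMarks s)

-- ===== LEMMAS AND PROOFS =====

-- The token stream both programs implicitly walk: (digit value, '?'s since previous digit).
def pvTokP : List Char → Int → List (Int × Int)
  | [], _ => []
  | c :: cs, q =>
      if PySem.Chars.isdigit c then (pvDigVal c, q) :: pvTokP cs 0
      else if c = '?' then pvTokP cs (q + 1)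
      else pvTokP cs q

-- Pairwise check over the token stream, carrying the previous digit.
def pvChkP : Int → List (Int × Int) → Bool → String
  | _, [], found => if found then "true" else "false"
  | prev, (d, g) :: rest, found =>
      if prev + d = 10 then
        if g ≠ 3 then "false" else pvChkP d rest true
      else pvChkP d rest found

theorem pvLoopA_eq_chkP (cs : List Char) :
    ∀ q has10 dig, pvLoopA cs q has10 dig = pvChkP dig (pvTokP cs q) has10 := by
  induction cs with
  | nil => intro q h d; simp [pvLoopA, pvTokP, pvChkP]
  | cons c cs ih =>
      intro q h d
      simp only [pvLoopA, pvTokP]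
      by_cases hd : PySem.Chars.isdigit c
      · simp only [hd, if_pos, pvChkP]
        rw [add_comm (pvDigVal c) d]
        by_cases h10 : d + pvDigVal c = 10
        · simp [h10, ih]
        · simp [h10, ih]
      · by_cases hc : c = '?'
        · subst hc; simp [hd, ih]
        · simp [hd, hc, ih]

theorem pvTokB_acc (cs : List Char) :
    ∀ vals gaps q, pvTokB cs vals gaps q =
      (vals ++ (pvTokP cs q).map Prod.fst, gaps ++ (pvTokP cs q).map Prod.snd) := by
  induction cs with
  | nil => intro vals gaps q; simp [pvTokB, pvTokP]
  | cons c cs ih =>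
      intro vals gaps q
      simp only [pvTokB, pvTokP]
      by_cases hd : PySem.Chars.isdigit c
      · simp [hd, ih]
      · by_cases hc : c = '?'
        · subst hc; simp [hd, ih]
        · simp [hd, hc, ih]

theorem pvChkB_eq_chkP (l : List (Int × Int)) :
    ∀ prev found,
      pvChkB (prev :: l.map Prod.fst) (l.map Prod.snd) found = pvChkP prev l found := by
  induction l with
  | nil => intro prev found; simp [pvChkB, pvChkP]
  | cons p rest ih =>
      intro prev found
      obtain ⟨d, g⟩ := p
      by_cases h10 : prev + d = 10
      · by_cases hg : g ≠ 3 <;> simp [pvChkB, pvChkP, h10, hg, ih]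
      · simp [pvChkB, pvChkP, h10, ih]

-- every digit value in the token stream lies in 0..9
theorem pvDigVal_bound (c : Char) (hd : PySem.Chars.isdigit c = true) :
    0 ≤ pvDigVal c ∧ pvDigVal c ≤ 9 := by
  simp [PySem.Chars.isdigit] at hd
  obtain ⟨h1, h2⟩ := hd
  rw [Char.le_def] at h1 h2
  rw [UInt32.le_iff_toNat_le] at h1 h2
  have h1' : 48 ≤ c.toNat := h1
  have h2' : c.toNat ≤ 57 := h2
  simp only [pvDigVal]
  omega

theorem pvTokP_fst_le (cs : List Char) :
    ∀ q p, p ∈ pvTokP cs q → 0 ≤ p.1 ∧ p.1 ≤ 9 := by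
  induction cs with
  | nil => intro q p hp; simp [pvTokP] at hp
  | cons c cs ih =>
      intro q p hp
      simp only [pvTokP] at hp
      by_cases hd : PySem.Chars.isdigit c
      · simp [hd] at hp
        rcases hp with h | h
        · subst h; exact pvDigVal_bound c hd
        · exact ih _ _ h
      · by_cases hc : c = '?'
        · subst hc; simp [hd] at hp; exact ih _ _ hp
        · simp [hd, hc] at hp; exact ih _ _ hp

-- ===== VERDICT (by name: the statement is the Claim_ definition above) =====
theorem QuestionMarks_spec : Claim_equal_QuestionMarks := by
  intro s _
  unfold Spec_QuestionMarks QuestionMarks QuestionMarks_alt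
  rw [pvTokB_acc]
  simp only [List.nil_append]
  rw [pvLoopA_eq_chkP]
  cases htok : pvTokP s.toList 0 with
  | nil => simp [pvChkP, pvChkB]
  | cons p rest =>
      obtain ⟨d, g⟩ := p
      have hbound := pvTokP_fst_le s.toList 0 (d, g) (by rw [htok]; exact List.mem_cons_self ..)
      have h10 : ¬ (d = 10) := by simp at hbound; omega
      simp only [List.map_cons, List.tail_cons]
      rw [pvChkB_eq_chkP, pvChkP]
      simp [h10]
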